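-- pv_equiv track=rewrite | github.com/j3brns/tf-acore-aas | src/bridge/handler.py | _is_invoke_contract_path
-- ===== SOURCE A (Python) =====
-- def _is_invoke_contract_path(path: str, agent_name: str | None) -> bool:
--     normalized = str(path).rstrip("/")
--     if not normalized.endswith("/invoke"):
--         return False
--
--     # Accept optional stage prefixes and validate the right-most contract path.
--     segments = [segment for segment in normalized.split("/") if segment]
--     if len(segments) < 4:
--         return False
--     if segments[-4] != "v1" or segments[-3] != "agents" or segments[-1] != "invoke":
--         return False
--
--     route_agent_name = segments[-2].strip()
--     if not route_agent_name:
--         return False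
--     return agent_name is None or route_agent_name == agent_name
-- ===== SOURCE B (Python) =====
-- def _is_invoke_contract_path(path: str, agent_name: str | None) -> bool:
--     # Backwards suffix scan: peel the last four '/'-separated segments off the
--     # end of the path directly, never building the full segment list.
--     s = str(path)
--
--     def take_token(t: str) -> tuple[str, str]:
--         i = len(t)
--         while i and t[i - 1] == "/":
--             i -= 1
--         j = i
--         while j and t[j - 1] != "/":
--             j -= 1
--         return t[j:i], t[:j]
--
--     t1, s = take_token(s)
--     if t1 != "invoke":
--         return False
--     agent, s = take_token(s)
--     t3, s = take_token(s)
--     if t3 != "agents":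
--         return False
--     if take_token(s)[0] != "v1":
--         return False
--     agent = agent.strip()
--     if not agent:
--         return False
--     return agent_name is None or agent == agent_name
-- ===== Notes on version B (the rewrite author's own statement) =====
-- stated objective: alternative
-- what changed: A rstrips, checks endswith('/invoke'), splits the whole path into a filtered segment list and indexes it from the end; B never builds a segment list: a single backwards suffix scan (take_token) peels the last four '/'-separated segments off the path and checks them one by one.
import Mathlib
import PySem

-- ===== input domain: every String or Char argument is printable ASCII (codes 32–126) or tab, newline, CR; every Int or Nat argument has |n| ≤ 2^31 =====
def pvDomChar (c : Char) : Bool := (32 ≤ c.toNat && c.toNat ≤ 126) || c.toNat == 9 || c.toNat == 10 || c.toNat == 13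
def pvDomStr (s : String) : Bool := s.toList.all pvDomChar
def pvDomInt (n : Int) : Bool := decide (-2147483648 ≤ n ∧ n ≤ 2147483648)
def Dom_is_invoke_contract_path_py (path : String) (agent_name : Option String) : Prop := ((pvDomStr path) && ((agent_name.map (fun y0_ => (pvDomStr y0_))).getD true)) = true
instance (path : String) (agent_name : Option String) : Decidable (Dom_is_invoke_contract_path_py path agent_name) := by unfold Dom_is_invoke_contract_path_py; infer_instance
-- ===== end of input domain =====

-- B replaces A's rstrip/endswith/split/negative-index pipeline by a single backwards
-- suffix scan that peels the last four '/'-separated segments off the path without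
-- building the segment list (objective: alternative).

-- ===== PORT A =====
-- str(path).rstrip("/") is ported by hand (PySem has no rstrip-with-chars):
-- dropping the trailing '/' characters via reverse/dropWhile/reverse is exact.
def is_invoke_contract_path_py (path : String) (agent_name : Option String) : Bool :=
  let normalized : List Char := (path.toList.reverse.dropWhile (· == '/')).reverse
  if ¬ PySem.Chars.endswith normalized "/invoke".toList then false
  else
    let segments : List (List Char) :=
      (PySem.Chars.splitOn normalized "/".toList).filter (fun seg => !seg.isEmpty)
    if segments.length < 4 then false
    else if PySem.List.pyGetD segments (-4) [] ≠ "v1".toList ∨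
            PySem.List.pyGetD segments (-3) [] ≠ "agents".toList ∨
            PySem.List.pyGetD segments (-1) [] ≠ "invoke".toList then false
    else
      let route_agent_name := PySem.Chars.strip (PySem.List.pyGetD segments (-2) [])
      if route_agent_name.isEmpty then false
      else match agent_name with
        | none => true
        | some a => decide (route_agent_name = a.toList)

-- ===== PORT B =====
-- Source B's take_token: the two index-decrementing while-loops that walk backwards over
-- trailing '/'s and then over the token become dropWhile/takeWhile on the REVERSED
-- character list (exact; the returned t[j:i] and t[:j] are kept reversed, so
-- take_token's first component is .1.reverse).
def pvTakeTok (r : List Char) : List Char × List Char :=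
  let r1 := r.dropWhile (· == '/')
  (r1.takeWhile (· ≠ '/'), r1.dropWhile (· ≠ '/'))


def is_invoke_contract_path_py_alt (path : String) (agent_name : Option String) : Bool :=
  let p1 := pvTakeTok path.toList.reverse
  if p1.1.reverse ≠ "invoke".toList then false
  else
    let p2 := pvTakeTok p1.2
    let p3 := pvTakeTok p2.2
    if p3.1.reverse ≠ "agents".toList then false
    else if (pvTakeTok p3.2).1.reverse ≠ "v1".toList then false
    else
      let agent := PySem.Chars.strip p2.1.reverse
      if agent.isEmpty then false
      else match agent_name with
        | none => true
        | some a => decide (agent = a.toList)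

-- ===== PRECONDITION & SPEC =====
def Spec_is_invoke_contract_path_py (path : String) (agent_name : Option String) (out : Bool) : Prop := out = is_invoke_contract_path_py_alt path agent_name
instance (path : String) (agent_name : Option String) (out : Bool) : Decidable (Spec_is_invoke_contract_path_py path agent_name out) := by unfold Spec_is_invoke_contract_path_py; infer_instance

-- ===== CLAIM (what is proved, stated in full; the proofs are below) =====
def Claim_equal_is_invoke_contract_path_py : Prop := ∀ (path : String) (agent_name : Option String), Dom_is_invoke_contract_path_py path agent_name → Spec_is_invoke_contract_path_py path agent_name (is_invoke_contract_path_py path agent_name)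

-- ===== LEMMAS AND PROOFS =====

def pvSplit : List Char → List (List Char)
  | [] => [[]]
  | c :: l => if c = '/' then [] :: pvSplit l else (pvSplit l).modifyHead (c :: ·)

theorem pvSplit_ne_nil (l : List Char) : pvSplit l ≠ [] := by
  cases l with
  | nil => simp [pvSplit]
  | cons c l =>
    simp only [pvSplit]
    split
    · simp
    · cases h : pvSplit l with
      | nil => exact absurd h (pvSplit_ne_nil l)
      | cons a t => simp [List.modifyHead]

theorem splitOn_go_eq (fuel : Nat) : ∀ (l cur : List Char) (acc : List (List Char)),
    l.length ≤ fuel →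
    PySem.Chars.splitOn.go ['/'] fuel l cur acc
      = acc.reverse ++ (pvSplit l).modifyHead (cur.reverse ++ ·) := by
  induction fuel with
  | zero =>
    intro l cur acc h
    have : l = [] := List.eq_nil_of_length_eq_zero (Nat.le_zero.mp h)
    subst this
    simp [PySem.Chars.splitOn.go, pvSplit]
  | succ n ih =>
    intro l cur acc h
    cases l with
    | nil => simp [PySem.Chars.splitOn.go, pvSplit]
    | cons c rest =>
      simp only [PySem.Chars.splitOn.go]
      by_cases hc : c = '/'
      · subst hc
        rw [if_pos (by simp [List.isPrefixOf])]
        simp only [List.length_cons, List.length_nil, List.drop_succ_cons, List.drop_zero]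
        rw [ih rest [] (cur.reverse :: acc) (by simp at h; omega)]
        simp [pvSplit, List.modifyHead]
        cases pvSplit rest <;> rfl
      · rw [if_neg (by simp [List.isPrefixOf]; exact fun h => hc h.symm)]
        rw [ih rest (c :: cur) acc (by simp at h; omega)]
        simp only [pvSplit, if_neg hc]
        cases hp : pvSplit rest with
        | nil => exact absurd hp (pvSplit_ne_nil rest)
        | cons a t => simp [List.modifyHead]

theorem splitOn_eq_pvSplit (l : List Char) : PySem.Chars.splitOn l ['/'] = pvSplit l := by
  rw [PySem.Chars.splitOn, splitOn_go_eq (l.length + 1) l [] [] (by omega)]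
  cases h : pvSplit l with
  | nil => exact absurd h (pvSplit_ne_nil l)
  | cons a t => simp [List.modifyHead]

def pvSegs (l : List Char) : List (List Char) := (pvSplit l).filter (fun s => !s.isEmpty)

theorem pvSegs_nil : pvSegs [] = [] := by simp [pvSegs, pvSplit]

theorem pvSplit_append_slash (xs ys : List Char) :
    pvSplit (xs ++ '/' :: ys) = pvSplit xs ++ pvSplit ys := by
  induction xs with
  | nil => simp [pvSplit]
  | cons c xs ih =>
    by_cases hc : c = '/'
    · subst hc; simp [pvSplit, ih]
    · simp only [List.cons_append, pvSplit, if_neg hc, ih]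
      cases h : pvSplit xs with
      | nil => exact absurd h (pvSplit_ne_nil xs)
      | cons a t => simp [List.modifyHead]

theorem pvSegs_append_slash (xs ys : List Char) :
    pvSegs (xs ++ '/' :: ys) = pvSegs xs ++ pvSegs ys := by
  simp [pvSegs, pvSplit_append_slash]

theorem pvSplit_slashfree (t : List Char) (h : ∀ c ∈ t, c ≠ '/') :
    pvSplit t = [t] := by
  induction t with
  | nil => rfl
  | cons c t ih =>
    have hc : c ≠ '/' := h c (by simp)
    rw [pvSplit, if_neg hc, ih (fun x hx => h x (by simp [hx]))]
    rfl

theorem pvSegs_slashfree (t : List Char) (h : ∀ c ∈ t, c ≠ '/') :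
    pvSegs t = if t.isEmpty then [] else [t] := by
  rw [pvSegs, pvSplit_slashfree t h]
  cases t <;> simp

theorem pvSegs_replicate (n : Nat) : pvSegs (List.replicate n '/') = [] := by
  induction n with
  | zero => exact pvSegs_nil
  | succ m ihm =>
    have h2 : List.replicate (m + 1) '/' = ([] : List Char) ++ ('/' : Char) :: List.replicate m '/' := rfl
    rw [h2, pvSegs_append_slash, pvSegs_nil, List.nil_append, ihm]

theorem pvSegs_append_replicate (x : List Char) (k : Nat) :
    pvSegs (x ++ List.replicate k '/') = pvSegs x := by
  cases k with
  | zero => simp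
  | succ n =>
    have : List.replicate (n + 1) '/' = ('/' : Char) :: List.replicate n '/' := rfl
    rw [this, pvSegs_append_slash, pvSegs_replicate, List.append_nil]

theorem dropWhile_head_false {p : Char → Bool} {l : List Char} {a : Char} {as : List Char}
    (h : l.dropWhile p = a :: as) : p a = false := by
  have := List.head?_dropWhile_not p l
  rw [h] at this
  simpa using this

theorem pvTakeTok_fst_slashfree (r : List Char) : ∀ c ∈ (pvTakeTok r).1, c ≠ '/' := by
  intro c hc
  have := List.mem_takeWhile_imp hc
  simpa using this

theorem pvTakeTok_fst_nil (r : List Char) (h : (pvTakeTok r).1 = []) : (pvTakeTok r).2 = [] := by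
  simp only [pvTakeTok] at *
  cases hr : r.dropWhile (· == '/') with
  | nil => simp
  | cons a as =>
    have ha : a ≠ '/' := by simpa using dropWhile_head_false hr
    rw [hr, List.takeWhile_cons] at h
    simp [ha] at h

theorem pvTakeTok_snd_head (r : List Char) :
    (pvTakeTok r).2 = [] ∨ ∃ s', (pvTakeTok r).2 = '/' :: s' := by
  cases hs : (pvTakeTok r).2 with
  | nil => exact Or.inl rfl
  | cons a s' =>
    right
    refine ⟨s', ?_⟩
    have hs' : (r.dropWhile (· == '/')).dropWhile (fun c => decide ¬(c = '/')) = a :: s' := by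
      simpa [pvTakeTok] using hs
    have ha : (fun c => decide ¬(c = '/')) a = false := dropWhile_head_false hs'
    simp at ha
    rw [ha]

theorem dropWhile_slash_idem (l : List Char) :
    (l.dropWhile (· == '/')).dropWhile (· == '/') = l.dropWhile (· == '/') := by
  cases hr : l.dropWhile (· == '/') with
  | nil => rfl
  | cons a as =>
    rw [List.dropWhile_cons]
    simp [show ¬((a == '/') = true) by simp [dropWhile_head_false hr]]

theorem pvTakeTok_dropWhile (r : List Char) :
    pvTakeTok (r.dropWhile (· == '/')) = pvTakeTok r := by
  simp only [pvTakeTok, dropWhile_slash_idem]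

theorem takeWhile_replicate_eq (l : List Char) :
    l.takeWhile (· == '/') = List.replicate (l.takeWhile (· == '/')).length '/' := by
  apply List.eq_replicate_of_mem
  intro b hb
  simpa using List.mem_takeWhile_imp hb

theorem pvSegs_pop (r : List Char) :
    pvSegs r.reverse = if (pvTakeTok r).1 = [] then []
      else pvSegs (pvTakeTok r).2.reverse ++ [(pvTakeTok r).1.reverse] := by
  have hdecomp : r = r.takeWhile (· == '/') ++ r.dropWhile (· == '/') :=
    (List.takeWhile_append_dropWhile).symm
  have hts : r.dropWhile (· == '/')
      = (pvTakeTok r).1 ++ (pvTakeTok r).2 := (List.takeWhile_append_dropWhile).symm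
  have hstep : pvSegs r.reverse = pvSegs (r.dropWhile (· == '/')).reverse := by
    conv_lhs => rw [hdecomp]
    rw [List.reverse_append]
    conv_lhs => rw [takeWhile_replicate_eq r, List.reverse_replicate]
    exact pvSegs_append_replicate _ _
  rw [hstep]
  by_cases hT : (pvTakeTok r).1 = []
  · rw [if_pos hT]
    have h2 : (pvTakeTok r).2 = [] := pvTakeTok_fst_nil r hT
    rw [hts, hT, h2]
    exact pvSegs_nil
  · rw [if_neg hT]
    have hfree : ∀ c ∈ (pvTakeTok r).1.reverse, c ≠ '/' := by
      intro c hc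
      exact pvTakeTok_fst_slashfree r c (List.mem_reverse.mp hc)
    have htok : pvSegs (pvTakeTok r).1.reverse = [(pvTakeTok r).1.reverse] := by
      rw [pvSegs_slashfree _ hfree, if_neg (by simpa using hT)]
    rcases pvTakeTok_snd_head r with h2 | ⟨s', h2⟩
    · rw [hts, h2, List.append_nil, htok, List.reverse_nil, pvSegs_nil, List.nil_append]
    · rw [hts, h2, List.reverse_append, List.reverse_cons]
      rw [List.append_assoc, List.singleton_append, pvSegs_append_slash, htok]
      have h3 : pvSegs (s'.reverse ++ ['/']) = pvSegs s'.reverse := by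
        rw [show s'.reverse ++ ['/'] = s'.reverse ++ List.replicate 1 '/' from rfl]
        exact pvSegs_append_replicate _ _
      rw [h3]

theorem pyGetD_app4 (xs : List (List Char)) (a b c d : List Char) :
    PySem.List.pyGetD (xs ++ [a, b, c, d]) (-1) [] = d ∧
    PySem.List.pyGetD (xs ++ [a, b, c, d]) (-2) [] = c ∧
    PySem.List.pyGetD (xs ++ [a, b, c, d]) (-3) [] = b ∧
    PySem.List.pyGetD (xs ++ [a, b, c, d]) (-4) [] = a := by
  have hlen : (xs ++ [a, b, c, d]).length = xs.length + 4 := by simp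
  refine ⟨?_, ?_, ?_, ?_⟩
  · rw [PySem.List.pyGetD_neg_ofNat _ 1 [] (by omega) (by simp)]
    rw [List.getElem_append_right (by omega)]
    simp [hlen]
  · rw [PySem.List.pyGetD_neg_ofNat _ 2 [] (by omega) (by simp)]
    rw [List.getElem_append_right (by omega)]
    simp [hlen]
  · rw [PySem.List.pyGetD_neg_ofNat _ 3 [] (by omega) (by simp)]
    rw [List.getElem_append_right (by omega)]
    simp [hlen]
  · rw [PySem.List.pyGetD_neg_ofNat _ 4 [] (by omega) (by simp)]
    rw [List.getElem_append_right (by omega)]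
    simp [hlen]

theorem endswith_iff (r1 : List Char) (h : r1.dropWhile (· == '/') = r1) :
    PySem.Chars.endswith r1.reverse "/invoke".toList = true
    ↔ ((pvTakeTok r1).1 = ['e','k','o','v','n','i'] ∧ (pvTakeTok r1).2 ≠ []) := by
  have hsuf : PySem.Chars.endswith r1.reverse "/invoke".toList = true
      ↔ ['e','k','o','v','n','i','/'] <+: r1 := by
    rw [PySem.Chars.endswith_iff]
    constructor
    · intro hx
      have h2 := hx.reverse
      simpa using h2
    · intro hx
      have h2 : (['e','k','o','v','n','i','/'] : List Char).reverse <:+ r1.reverse := by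
        exact hx.reverse
      simpa using h2
  rw [hsuf]
  constructor
  · rintro ⟨u, hu⟩
    have : r1 = 'e'::'k'::'o'::'v'::'n'::'i'::'/'::u := by rw [← hu]; rfl
    subst this
    constructor
    · simp [pvTakeTok, h, List.takeWhile]
    · simp [pvTakeTok, List.dropWhile]
  · rintro ⟨h1, h2⟩
    rcases pvTakeTok_snd_head r1 with hnil | ⟨s', hs⟩
    · exact absurd hnil h2
    have hts : r1 = (pvTakeTok r1).1 ++ (pvTakeTok r1).2 := by
      simp only [pvTakeTok, h]
      exact (List.takeWhile_append_dropWhile).symm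
    rw [hts, h1, hs]
    exact ⟨s', rfl⟩

theorem pvTakeTok_nil : pvTakeTok [] = ([], []) := rfl

theorem main_eq (path : String) (an : Option String) :
    is_invoke_contract_path_py path an = is_invoke_contract_path_py_alt path an := by
  unfold is_invoke_contract_path_py is_invoke_contract_path_py_alt
  have hsl : ("/".toList : List Char) = ['/'] := rfl
  set r : List Char := path.toList.reverse with hrdef
  set r1 : List Char := r.dropWhile (· == '/') with hr1def
  have hidem : r1.dropWhile (· == '/') = r1 := dropWhile_slash_idem r
  have htt : pvTakeTok r1 = pvTakeTok r := pvTakeTok_dropWhile r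
  set p1 := pvTakeTok r with hp1
  set p2 := pvTakeTok p1.2 with hp2
  set p3 := pvTakeTok p2.2 with hp3
  set p4 := pvTakeTok p3.2 with hp4
  have hsegdef : (PySem.Chars.splitOn r1.reverse "/".toList).filter (fun seg => !seg.isEmpty)
      = pvSegs r1.reverse := by
    rw [hsl, splitOn_eq_pvSplit]; rfl
  have hpop1 : pvSegs r1.reverse
      = if p1.1 = [] then [] else pvSegs p1.2.reverse ++ [p1.1.reverse] := by
    rw [pvSegs_pop r1, htt]
  have hES := endswith_iff r1 hidem
  rw [htt] at hES
  have hrevinv : ∀ t : List Char, t.reverse = "invoke".toList ↔ t = ['e','k','o','v','n','i'] := by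
    intro t
    rw [List.reverse_eq_iff]
    constructor <;> (intro h; rw [h]) <;> rfl
  by_cases hb1 : p1.1.reverse = "invoke".toList
  case neg =>
    -- token 1 is not "invoke": endswith fails, both sides are false
    have hE : ¬ PySem.Chars.endswith r1.reverse "/invoke".toList = true := by
      rw [hES]
      rintro ⟨h, -⟩
      exact hb1 ((hrevinv p1.1).mpr h)
    rw [if_pos (show ¬ PySem.Chars.endswith r1.reverse "/invoke".toList = true from hE),
        if_pos (show p1.1.reverse ≠ "invoke".toList from hb1)]
  case pos =>
  have ht1 : p1.1 = ['e','k','o','v','n','i'] := (hrevinv p1.1).mp hb1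
  have ht1ne : ¬ p1.1 = [] := by rw [ht1]; simp
  rw [if_neg (show ¬ p1.1.reverse ≠ "invoke".toList from not_not_intro hb1)]
  by_cases hs1 : p1.2 = []
  case pos =>
    -- "invoke" with nothing before it: endswith is false; B dies at the "agents" check
    have hE : ¬ PySem.Chars.endswith r1.reverse "/invoke".toList = true := by
      rw [hES]; rintro ⟨-, h⟩; exact h hs1
    have h2 : p2 = ([], []) := by rw [hp2, hs1, pvTakeTok_nil]
    have h3 : p3 = ([], []) := by rw [hp3, h2, pvTakeTok_nil]
    rw [if_pos (show ¬ PySem.Chars.endswith r1.reverse "/invoke".toList = true from hE),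
        if_pos (show p3.1.reverse ≠ "agents".toList by rw [h3]; intro hx; exact absurd hx.symm (by decide))]
  case neg =>
  have hE : PySem.Chars.endswith r1.reverse "/invoke".toList = true := hES.mpr ⟨ht1, hs1⟩
  rw [if_neg (show ¬¬ PySem.Chars.endswith r1.reverse "/invoke".toList = true from not_not_intro hE)]
  rw [hsegdef, hpop1, if_neg ht1ne]
  have hpop2 : pvSegs p1.2.reverse
      = if p2.1 = [] then [] else pvSegs p2.2.reverse ++ [p2.1.reverse] := pvSegs_pop p1.2
  by_cases h2 : p2.1 = []
  case pos =>
    -- only one nonempty segment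
    have h2s : p2.2 = [] := pvTakeTok_fst_nil _ h2
    have h3 : p3 = ([], []) := by rw [hp3, h2s, pvTakeTok_nil]
    rw [hpop2, if_pos h2,
        if_pos (show (([] : List (List Char)) ++ [p1.1.reverse]).length < 4 by simp),
        if_pos (show p3.1.reverse ≠ "agents".toList by rw [h3]; intro hx; exact absurd hx.symm (by decide))]
  case neg =>
  rw [hpop2, if_neg h2]
  have hpop3 : pvSegs p2.2.reverse
      = if p3.1 = [] then [] else pvSegs p3.2.reverse ++ [p3.1.reverse] := pvSegs_pop p2.2
  by_cases h3 : p3.1 = []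
  case pos =>
    -- two nonempty segments
    rw [hpop3, if_pos h3,
        if_pos (show ((([] : List (List Char)) ++ [p2.1.reverse]) ++ [p1.1.reverse]).length < 4 by simp),
        if_pos (show p3.1.reverse ≠ "agents".toList by rw [h3]; intro hx; exact absurd hx.symm (by decide))]
  case neg =>
  rw [hpop3, if_neg h3]
  have hpop4 : pvSegs p3.2.reverse
      = if p4.1 = [] then [] else pvSegs p4.2.reverse ++ [p4.1.reverse] := pvSegs_pop p3.2
  by_cases hb3 : p3.1.reverse = "agents".toList
  case neg =>
    rw [if_pos (show p3.1.reverse ≠ "agents".toList from hb3)]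
    by_cases h4 : p4.1 = []
    · -- three nonempty segments
      rw [hpop4, if_pos h4,
          if_pos (show (((([] : List (List Char)) ++ [p3.1.reverse]) ++ [p2.1.reverse]) ++ [p1.1.reverse]).length < 4 by simp)]
    · rw [hpop4, if_neg h4]
      have hL : ((pvSegs p4.2.reverse ++ [p4.1.reverse]) ++ [p3.1.reverse]) ++ [p2.1.reverse] ++ [p1.1.reverse]
          = pvSegs p4.2.reverse ++ [p4.1.reverse, p3.1.reverse, p2.1.reverse, p1.1.reverse] := by simp
      rw [hL]
      obtain ⟨g1, g2, g3, g4⟩ :=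
        pyGetD_app4 (pvSegs p4.2.reverse) p4.1.reverse p3.1.reverse p2.1.reverse p1.1.reverse
      rw [if_neg (show ¬ (pvSegs p4.2.reverse ++ [p4.1.reverse, p3.1.reverse, p2.1.reverse, p1.1.reverse]).length < 4 by simp)]
      rw [g1, g2, g3, g4]
      rw [if_pos (show p4.1.reverse ≠ "v1".toList ∨ p3.1.reverse ≠ "agents".toList ∨ p1.1.reverse ≠ "invoke".toList from Or.inr (Or.inl hb3))]
  case pos =>
  rw [if_neg (show ¬ p3.1.reverse ≠ "agents".toList from not_not_intro hb3)]
  by_cases h4 : p4.1 = []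
  case pos =>
    -- three nonempty segments; B dies at the "v1" check
    rw [hpop4, if_pos h4,
        if_pos (show (((([] : List (List Char)) ++ [p3.1.reverse]) ++ [p2.1.reverse]) ++ [p1.1.reverse]).length < 4 by simp),
        if_pos (show p4.1.reverse ≠ "v1".toList by rw [h4]; intro hx; exact absurd hx.symm (by decide))]
  case neg =>
  rw [hpop4, if_neg h4]
  have hL : ((pvSegs p4.2.reverse ++ [p4.1.reverse]) ++ [p3.1.reverse]) ++ [p2.1.reverse] ++ [p1.1.reverse]
      = pvSegs p4.2.reverse ++ [p4.1.reverse, p3.1.reverse, p2.1.reverse, p1.1.reverse] := by simp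
  rw [hL]
  obtain ⟨g1, g2, g3, g4⟩ :=
    pyGetD_app4 (pvSegs p4.2.reverse) p4.1.reverse p3.1.reverse p2.1.reverse p1.1.reverse
  rw [if_neg (show ¬ (pvSegs p4.2.reverse ++ [p4.1.reverse, p3.1.reverse, p2.1.reverse, p1.1.reverse]).length < 4 by simp)]
  rw [g1, g2, g3, g4]
  by_cases hb4 : p4.1.reverse = "v1".toList
  case neg =>
    rw [if_pos (show p4.1.reverse ≠ "v1".toList ∨ p3.1.reverse ≠ "agents".toList ∨ p1.1.reverse ≠ "invoke".toList from Or.inl hb4),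
        if_pos (show p4.1.reverse ≠ "v1".toList from hb4)]
  case pos =>
  rw [if_neg (show ¬ (p4.1.reverse ≠ "v1".toList ∨ p3.1.reverse ≠ "agents".toList ∨ p1.1.reverse ≠ "invoke".toList) by
        rintro (h | h | h) <;> [exact h hb4; exact h hb3; exact h hb1]),
      if_neg (show ¬ p4.1.reverse ≠ "v1".toList from not_not_intro hb4)]

-- ===== VERDICT (by name: the statement is the Claim_ definition above) =====
theorem is_invoke_contract_path_py_spec : Claim_equal_is_invoke_contract_path_py := by
  intro path agent_name _
  unfold Spec_is_invoke_contract_path_py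
  exact main_eq path agent_name
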